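-- pv_equiv track=rewrite | github.com/Lambosaurus/Advent-of-code | 2025/11/main.py | reverse_map
-- ===== SOURCE A (Python) =====
-- def reverse_map(node_dst):
--     node_src = { n: [] for n in node_dst }
--     for node, dsts in node_dst.items():
--         for dst in dsts:
--             if dst not in node_src:
--                 # Some nodes (like "out" are not listed.)
--                 node_src[dst] = []
--             node_src[dst].append(node)
--     return node_src
-- ===== SOURCE B (Python) =====
-- def reverse_map(node_dst):
--     nodes = dict.fromkeys(node_dst)
--     for dsts in node_dst.values():
--         nodes.update(dict.fromkeys(dsts))
--     return {d: [n for n, dsts in node_dst.items() for x in dsts if x == d]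
--             for d in nodes}
-- ===== Notes on version B (the rewrite author's own statement) =====
-- stated objective: alternative
-- what changed: A does one edge-reversal pass appending into a growing dict; B first collects the full node set (keys plus all destinations) and then, per node, rescans every edge list to gather that node's sources with a comprehension.
import Mathlib
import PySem

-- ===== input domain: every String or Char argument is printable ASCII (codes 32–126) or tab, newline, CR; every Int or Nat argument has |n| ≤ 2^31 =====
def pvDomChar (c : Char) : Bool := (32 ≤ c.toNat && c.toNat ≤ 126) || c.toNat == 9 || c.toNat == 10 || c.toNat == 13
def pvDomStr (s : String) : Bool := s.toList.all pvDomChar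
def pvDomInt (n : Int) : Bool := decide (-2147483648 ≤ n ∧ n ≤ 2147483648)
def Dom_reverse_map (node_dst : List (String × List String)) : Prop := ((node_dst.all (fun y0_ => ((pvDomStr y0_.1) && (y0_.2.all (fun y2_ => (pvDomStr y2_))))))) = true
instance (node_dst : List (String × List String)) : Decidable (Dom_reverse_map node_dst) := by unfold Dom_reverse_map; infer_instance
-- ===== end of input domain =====

-- B replaces A's single edge-reversal pass with a node-set pass followed by a per-node
-- rescan of all edge lists (alternative decomposition, not faster). Same return value.

-- ===== PORT A =====
-- the body of A's inner loop: 'if dst not in node_src: node_src[dst] = []' then 'node_src[dst].append(node)'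
def pvStepA (node : String) (d : PySem.Dict String (List String)) (dst : String) :
    PySem.Dict String (List String) :=
  let d := if d.contains dst then d else d.insert dst []
  d.modify dst [] (fun l => l ++ [node])

def reverse_map (node_dst : List (String × List String)) : List (String × List String) :=
  -- node_src = { n: [] for n in node_dst }
  let node_src : PySem.Dict String (List String) :=
    node_dst.foldl (fun d p => d.insert p.1 ([] : List String)) PySem.Dict.empty
  -- for node, dsts in node_dst.items(): for dst in dsts: …
  (node_dst.foldl (fun d p => p.2.foldl (pvStepA p.1) d) node_src).items

-- ===== PORT B =====
def reverse_map_alt (node_dst : List (String × List String)) : List (String × List String) :=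
  -- nodes = dict.fromkeys(node_dst)
  let nodes : PySem.Dict String Unit :=
    node_dst.foldl (fun d p => d.insert p.1 ()) PySem.Dict.empty
  -- for dsts in node_dst.values(): nodes.update(dict.fromkeys(dsts))
  let nodes := node_dst.foldl (fun ns p => p.2.foldl (fun ns x => ns.insert x ()) ns) nodes
  -- {d: [n for n, dsts in node_dst.items() for x in dsts if x == d] for d in nodes}
  nodes.keys.map (fun d =>
    (d, node_dst.flatMap (fun p => (p.2.filter (fun x => x == d)).map (fun _ => p.1))))

-- ===== PRECONDITION & SPEC =====
def Spec_reverse_map (node_dst : List (String × List String)) (out : List (String × List String)) : Prop := out = reverse_map_alt node_dst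
instance (node_dst : List (String × List String)) (out : List (String × List String)) : Decidable (Spec_reverse_map node_dst out) := by unfold Spec_reverse_map; infer_instance

-- ===== CLAIM (what is proved, stated in full; the proofs are below) =====
def Claim_equal_reverse_map : Prop := ∀ (node_dst : List (String × List String)), Dom_reverse_map node_dst → Spec_reverse_map node_dst (reverse_map node_dst)

-- ===== LEMMAS AND PROOFS =====

-- keys of one A-step = Set.add
theorem pvStepA_keys (node : String) (d : PySem.Dict String (List String)) (dst : String) :
    (pvStepA node d dst).keys = PySem.Set.add d.keys dst := by
  unfold pvStepA
  by_cases h : d.contains dst = true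
  · simp only [h, if_true, PySem.Dict.keys_modify, PySem.Dict.keys_insert_of_contains _ _ h]
    simp [PySem.Set.add, (PySem.Dict.contains_iff_mem_keys d dst).mp h]
  · have h' : d.contains dst = false := by simpa using h
    have hm : dst ∉ d.keys := fun hm =>
      absurd ((PySem.Dict.contains_iff_mem_keys d dst).mpr hm) (by simp [h'])
    simp only [h', Bool.false_eq_true, if_false, PySem.Dict.keys_modify]
    rw [PySem.Dict.insert_insert_self, PySem.Dict.keys_insert_of_not_contains _ _ h']
    simp [PySem.Set.add, hm]

theorem pvStepA_getD (node : String) (d : PySem.Dict String (List String)) (dst k : String) :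
    (pvStepA node d dst).getD k [] =
      if k = dst then d.getD k [] ++ [node] else d.getD k [] := by
  unfold pvStepA
  by_cases h : d.contains dst = true
  · simp only [h, if_true, PySem.Dict.getD_modify]
    by_cases hk : k = dst
    · subst hk; simp
    · simp [hk]
  · have h' : d.contains dst = false := by simpa using h
    simp [h', PySem.Dict.getD_modify, PySem.Dict.getD_insert]
    rcases eq_or_ne k dst with hk | hk
    · subst hk; simp [PySem.Dict.getD_of_not_contains _ _ h']
    · simp [hk]

-- inner loop of A, keys
theorem pvInnerA_keys (node : String) (dsts : List String) (d : PySem.Dict String (List String)) :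
    (dsts.foldl (pvStepA node) d).keys = PySem.Set.update d.keys dsts := by
  induction dsts generalizing d with
  | nil => simp [PySem.Set.update_nil]
  | cons x xs ih =>
      simp only [List.foldl_cons, PySem.Set.update_cons, ← pvStepA_keys node d x]
      exact ih _

-- inner loop of A, values
theorem pvInnerA_getD (node : String) (dsts : List String) (d : PySem.Dict String (List String)) (k : String) :
    (dsts.foldl (pvStepA node) d).getD k [] =
      d.getD k [] ++ (dsts.filter (fun x => x == k)).map (fun _ => node) := by
  induction dsts generalizing d with
  | nil => simp
  | cons x xs ih =>
      simp only [List.foldl_cons, ih, pvStepA_getD]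
      rcases eq_or_ne k x with hk | hk
      · subst hk; simp
      · simp [hk, Ne.symm hk]

-- outer loop of A, keys
theorem pvOuterA_keys (l : List (String × List String)) (d : PySem.Dict String (List String)) :
    (l.foldl (fun d p => p.2.foldl (pvStepA p.1) d) d).keys =
      l.foldl (fun ks p => PySem.Set.update ks p.2) d.keys := by
  induction l generalizing d with
  | nil => rfl
  | cons p ps ih => simp only [List.foldl_cons, ih, pvInnerA_keys]

-- outer loop of A, values
theorem pvOuterA_getD (l : List (String × List String)) (d : PySem.Dict String (List String)) (k : String) :
    (l.foldl (fun d p => p.2.foldl (pvStepA p.1) d) d).getD k [] =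
      d.getD k [] ++ l.flatMap (fun p => (p.2.filter (fun x => x == k)).map (fun _ => p.1)) := by
  induction l generalizing d with
  | nil => simp
  | cons p ps ih => simp [List.foldl_cons, ih, pvInnerA_getD]

-- A's initial dict maps everything to []
theorem pvInitA_getD (l : List (String × List String)) (d : PySem.Dict String (List String)) (k : String)
    (h : d.getD k [] = []) :
    (l.foldl (fun d p => d.insert p.1 ([] : List String)) d).getD k [] = [] := by
  induction l generalizing d with
  | nil => exact h
  | cons p ps ih =>
      refine ih _ ?_
      rw [PySem.Dict.getD_insert]
      split <;> simp [h]

-- keys of B's nodes dict = keys of A's final dict (same Set.update fold)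
theorem pvKeysB (l : List (String × List String)) (ns : PySem.Dict String Unit) :
    (l.foldl (fun ns p => p.2.foldl (fun ns x => ns.insert x ()) ns) ns).keys =
      l.foldl (fun ks p => PySem.Set.update ks p.2) ns.keys := by
  induction l generalizing ns with
  | nil => rfl
  | cons p ps ih =>
      simp only [List.foldl_cons, ih]
      congr 1
      exact PySem.Dict.keys_foldl_insert p.2 (fun _ _ => ()) ns

-- nodup of the shared keys fold
theorem pvKeysNodup (l : List (String × List String)) (ks : List String) (h : ks.Nodup) :
    (l.foldl (fun ks p => PySem.Set.update ks p.2) ks).Nodup := by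
  induction l generalizing ks with
  | nil => exact h
  | cons p ps ih => exact ih _ (PySem.Set.nodup_update _ _ h)

-- ===== VERDICT (by name: the statement is the Claim_ definition above) =====
theorem reverse_map_spec : Claim_equal_reverse_map := by
  intro node_dst _
  unfold Spec_reverse_map reverse_map reverse_map_alt
  -- both key lists are the same Set.update fold from the same start
  have hinitA := PySem.Dict.keys_foldl_insert_key node_dst (fun p => p.1)
      (fun _ _ => ([] : List String)) PySem.Dict.empty
  have hinitB := PySem.Dict.keys_foldl_insert_key node_dst (fun p => p.1)
      (fun _ _ => ()) (PySem.Dict.empty (κ := String) (ν := Unit))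
  have hkeysA := pvOuterA_keys node_dst
      (node_dst.foldl (fun d p => d.insert p.1 ([] : List String)) PySem.Dict.empty)
  have hkeysB := pvKeysB node_dst
      (node_dst.foldl (fun d p => d.insert p.1 ()) PySem.Dict.empty)
  have hkeq : (node_dst.foldl (fun d p => p.2.foldl (pvStepA p.1) d)
        (node_dst.foldl (fun d p => d.insert p.1 ([] : List String)) PySem.Dict.empty)).keys =
      (node_dst.foldl (fun ns p => p.2.foldl (fun ns x => ns.insert x ()) ns)
        (node_dst.foldl (fun d p => d.insert p.1 ()) PySem.Dict.empty)).keys := by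
    rw [hkeysA, hkeysB, hinitA, hinitB]
    rfl
  have hnodup : (node_dst.foldl (fun d p => p.2.foldl (pvStepA p.1) d)
        (node_dst.foldl (fun d p => d.insert p.1 ([] : List String)) PySem.Dict.empty)).keys.Nodup := by
    rw [hkeysA, hinitA]
    exact pvKeysNodup _ _ (PySem.Set.nodup_update _ _ (by simp [PySem.Dict.keys_empty]))
  rw [PySem.Dict.items_eq_map_keys _ hnodup ([] : List String), hkeq]
  refine List.map_congr_left ?_
  intro k _
  rw [pvOuterA_getD, pvInitA_getD _ _ _ (by simp [PySem.Dict.getD_empty])]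
  simp
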